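-- pv_equiv track=rewrite | github.com/liangyuzhe/agent-platform-py | agents/flow/sql_react.py | _expand_selected_tables_by_join_paths
-- ===== SOURCE A (Python) =====
-- def _shortest_join_path(
--     start: str,
--     end: str,
--     edges: list[dict[str, str]],
--     candidate_tables: set[str],
--     max_edges: int = 3,
-- ) -> list[str]:
--     """Find a short undirected FK path between two tables."""
--     if start == end or start not in candidate_tables or end not in candidate_tables:
--         return []
--
--     adjacency: dict[str, list[str]] = {}
--     for edge in edges:
--         from_table = edge.get("from_table")
--         to_table = edge.get("to_table")
--         if from_table not in candidate_tables or to_table not in candidate_tables: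
--             continue
--         adjacency.setdefault(from_table, []).append(to_table)
--         adjacency.setdefault(to_table, []).append(from_table)
--
--     queue: list[list[str]] = [[start]]
--     seen = {start}
--     while queue:
--         path = queue.pop(0)
--         if len(path) - 1 >= max_edges:
--             continue
--         for next_table in adjacency.get(path[-1], []):
--             if next_table in seen:
--                 continue
--             next_path = [*path, next_table]
--             if next_table == end:
--                 return next_path
--             seen.add(next_table)
--             queue.append(next_path)
--     return []
--
-- def _expand_selected_tables_by_join_paths(
--     selected: list[str],
--     candidate_tables: list[str],
--     edges: list[dict[str, str]],
--     max_edges: int = 3,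
-- ) -> list[str]:
--     """Add intermediate FK path tables between already-selected endpoints."""
--     expanded = list(selected)
--     candidate_set = set(candidate_tables)
--     anchors = [table for table in selected if table in candidate_set]
--
--     for left_index, left in enumerate(anchors):
--         for right in anchors[left_index + 1:]:
--             path = _shortest_join_path(left, right, edges, candidate_set, max_edges=max_edges)
--             for table in path[1:-1]:
--                 if table not in expanded:
--                     expanded.append(table)
--
--     return expanded
-- ===== SOURCE B (Python) =====
-- def _expand_selected_tables_by_join_paths(
--     selected,
--     candidate_tables,
--     edges,
--     max_edges=3,
-- ):
--     """Add intermediate FK path tables between already-selected endpoints."""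
--     candidate_set = set(candidate_tables)
--
--     # Build the candidate-filtered undirected adjacency once for all pairs.
--     adjacency = {}
--     for edge in edges:
--         from_table = edge.get("from_table")
--         to_table = edge.get("to_table")
--         if from_table in candidate_set and to_table in candidate_set:
--             adjacency.setdefault(from_table, []).append(to_table)
--             adjacency.setdefault(to_table, []).append(from_table)
--
--     expanded = list(selected)
--     present = set(selected)
--     anchors = [table for table in selected if table in candidate_set]
--
--     # One depth-capped, level-synchronous BFS per LEFT anchor builds a table of
--     # shortest paths from it; every right anchor is then answered by a lookup.
--     for i, left in enumerate(anchors):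
--         rights = anchors[i + 1:]
--         if not rights:
--             continue
--         paths = {left: [left]}
--         frontier = [left]
--         depth = 0
--         while frontier and depth < max_edges:
--             next_frontier = []
--             for table in frontier:
--                 for neighbor in adjacency.get(table, []):
--                     if neighbor not in paths:
--                         paths[neighbor] = paths[table] + [neighbor]
--                         next_frontier.append(neighbor)
--             frontier = next_frontier
--             depth += 1
--         for right in rights:
--             if right == left:
--                 continue
--             for table in paths.get(right, [])[1:-1]:
--                 if table not in present:
--                     present.add(table)
--                     expanded.append(table)
--     return expanded
-- ===== Notes on version B (the rewrite author's own statement) =====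
-- stated objective: faster
-- what changed: B replaces A's per-pair path-queue BFS (adjacency rebuilt and a FIFO queue of whole paths popped per anchor pair, early-returning on the end table) by: the adjacency built once, then ONE depth-capped level-synchronous BFS per left anchor that records a shortest-path table keyed by node, after which every right anchor is answered by a single dictionary lookup and slice.
import Mathlib
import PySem

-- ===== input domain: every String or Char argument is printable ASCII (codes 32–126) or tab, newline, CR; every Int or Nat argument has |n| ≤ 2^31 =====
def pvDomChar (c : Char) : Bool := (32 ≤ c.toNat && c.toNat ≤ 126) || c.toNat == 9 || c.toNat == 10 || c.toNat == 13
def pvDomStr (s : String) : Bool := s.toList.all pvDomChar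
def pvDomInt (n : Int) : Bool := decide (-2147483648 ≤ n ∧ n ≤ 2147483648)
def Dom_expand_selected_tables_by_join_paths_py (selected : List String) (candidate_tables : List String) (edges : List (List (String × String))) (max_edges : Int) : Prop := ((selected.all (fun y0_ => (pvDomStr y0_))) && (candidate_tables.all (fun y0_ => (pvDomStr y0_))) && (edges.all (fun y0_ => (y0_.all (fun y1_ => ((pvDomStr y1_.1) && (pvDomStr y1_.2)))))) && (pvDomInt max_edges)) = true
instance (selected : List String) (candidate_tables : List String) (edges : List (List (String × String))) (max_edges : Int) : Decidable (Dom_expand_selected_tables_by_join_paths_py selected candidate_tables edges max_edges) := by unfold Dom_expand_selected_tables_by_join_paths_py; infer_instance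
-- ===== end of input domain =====

-- B (faster, measured): adjacency built once, then ONE depth-capped level-synchronous BFS per left
-- anchor records a shortest-path table keyed by node; each right anchor is answered by a lookup.


-- ===== PORT A =====
-- A-side helpers: per-pair _shortest_join_path (adjacency rebuilt inside it, list queue with pop(0)).
-- The BFS while-loop carries a fuel counter (2*|edges|+2, an upper bound on its iterations) purely to make it total.

def pvAdjStepA (cset : PySem.Set String) (d : PySem.Dict String (List String)) (edge : List (String × String)) : PySem.Dict String (List String) :=
  let ed := PySem.Dict.ofList edge
  match ed.get? "from_table", ed.get? "to_table" with
  | some f, some t =>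
      if !(cset.contains f) || !(cset.contains t) then d
      else
        let d1 := d.insert f (d.getD f [] ++ [t])
        d1.insert t (d1.getD t [] ++ [f])
  | _, _ => d

def pvAdjA (cset : PySem.Set String) (edges : List (List (String × String))) : PySem.Dict String (List String) :=
  edges.foldl (pvAdjStepA cset) PySem.Dict.empty

-- the body of 'for next_table in adjacency.get(path[-1], [])' (early return = .inl)
def pvInnerA (endv : String) (path : List String) :
    List String → PySem.Set String → List (List String) →
    Sum (List String) (PySem.Set String × List (List String))
  | [], seen, queue => .inr (seen, queue)
  | n :: rest, seen, queue =>
    if seen.contains n then pvInnerA endv path rest seen queue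
    else if n == endv then .inl (path ++ [n])
    else pvInnerA endv path rest (seen.add n) (queue ++ [path ++ [n]])

-- 'while queue: path = queue.pop(0); …'
def pvLoopA (adj : PySem.Dict String (List String)) (endv : String) (max_edges : Int) :
    Nat → List (List String) → PySem.Set String → List String
  | 0, _, _ => []
  | _ + 1, [], _ => []
  | fuel + 1, path :: rest, seen =>
    if (path.length : Int) - 1 ≥ max_edges then pvLoopA adj endv max_edges fuel rest seen
    else
      match pvInnerA endv path (adj.getD ((PySem.List.pyGet? path (-1)).getD "") []) seen rest with
      | .inl res => res
      | .inr (seen', q') => pvLoopA adj endv max_edges fuel q' seen'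

def pvShortestJoinPathA (start endv : String) (edges : List (List (String × String)))
    (cset : PySem.Set String) (max_edges : Int) : List String :=
  if start == endv || !(cset.contains start) || !(cset.contains endv) then []
  else
    let adj := pvAdjA cset edges
    pvLoopA adj endv max_edges (2 * edges.length + 2) [[start]] (PySem.Set.ofList [start])

def expand_selected_tables_by_join_paths_py (selected : List String) (candidate_tables : List String) (edges : List (List (String × String))) (max_edges : Int) : List String :=
  let cset := PySem.Set.ofList candidate_tables
  let anchors := selected.filter (fun t => cset.contains t)
  (PySem.List.enumerate anchors).foldl
    (fun expanded p =>
      (PySem.List.slice anchors (some (p.1 + 1)) none).foldl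
        (fun expanded right =>
          let path := pvShortestJoinPathA p.2 right edges cset max_edges
          (PySem.List.slice path (some 1) (some (-1))).foldl
            (fun exp t => if exp.contains t then exp else exp ++ [t]) expanded)
        expanded)
    selected

-- ===== PORT B =====
-- B-side helpers: adjacency built once; per LEFT anchor one level-synchronous BFS recording a
-- shortest-path table 'paths'; every right anchor is a lookup. The while-loop over frontiers
-- carries a fuel counter (2*|edges|+2, an upper bound on the number of levels) purely for totality.

def pvAdjStepB (cset : PySem.Set String) (d : PySem.Dict String (List String)) (edge : List (String × String)) : PySem.Dict String (List String) :=
  let ed := PySem.Dict.ofList edge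
  match ed.get? "from_table", ed.get? "to_table" with
  | some f, some t =>
      if cset.contains f && cset.contains t then
        let d1 := d.insert f (d.getD f [] ++ [t])
        d1.insert t (d1.getD t [] ++ [f])
      else d
  | _, _ => d

def pvAdjB (cset : PySem.Set String) (edges : List (List (String × String))) : PySem.Dict String (List String) :=
  edges.foldl (pvAdjStepB cset) PySem.Dict.empty

-- 'if neighbor not in paths: paths[neighbor] = paths[table] + [neighbor]; next_frontier.append(neighbor)'
def pvVisit (u : String) (st : PySem.Dict String (List String) × List String) (v : String) :
    PySem.Dict String (List String) × List String :=
  if (st.1.get? v).isSome then st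
  else (st.1.insert v (st.1.getD u [] ++ [v]), st.2 ++ [v])

-- 'for table in frontier: for neighbor in adjacency.get(table, []): …'
def pvLevelStep (adj : PySem.Dict String (List String))
    (st : PySem.Dict String (List String) × List String) (u : String) :
    PySem.Dict String (List String) × List String :=
  (adj.getD u []).foldl (pvVisit u) st

-- 'while frontier and depth < max_edges: …'
def pvBfsB (adj : PySem.Dict String (List String)) (me : Int) :
    Nat → PySem.Dict String (List String) → List String → Int → PySem.Dict String (List String)
  | 0, paths, _, _ => paths
  | fuel + 1, paths, frontier, d =>
    if frontier.isEmpty then paths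
    else if d < me then
      let st := frontier.foldl (pvLevelStep adj) (paths, [])
      pvBfsB adj me fuel st.1 st.2 (d + 1)
    else paths

def expand_selected_tables_by_join_paths_py_alt (selected : List String) (candidate_tables : List String) (edges : List (List (String × String))) (max_edges : Int) : List String :=
  let cset := PySem.Set.ofList candidate_tables
  let adj := pvAdjB cset edges
  let anchors := selected.filter (fun t => cset.contains t)
  ((PySem.List.enumerate anchors).foldl
    (fun st p =>
      let rights := PySem.List.slice anchors (some (p.1 + 1)) none
      if rights.isEmpty then st
      else
        let paths := pvBfsB adj max_edges (2 * edges.length + 2)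
          (PySem.Dict.empty.insert p.2 [p.2]) [p.2] 0
        rights.foldl
          (fun st right =>
            if right == p.2 then st
            else
              (PySem.List.slice (paths.getD right []) (some 1) (some (-1))).foldl
                (fun st t => if st.2.contains t then st else (st.1 ++ [t], st.2.add t)) st)
          st)
    (selected, PySem.Set.ofList selected)).1

-- ===== PRECONDITION & SPEC =====
def Spec_expand_selected_tables_by_join_paths_py (selected : List String) (candidate_tables : List String) (edges : List (List (String × String))) (max_edges : Int) (out : List String) : Prop := out = expand_selected_tables_by_join_paths_py_alt selected candidate_tables edges max_edges
instance (selected : List String) (candidate_tables : List String) (edges : List (List (String × String))) (max_edges : Int) (out : List String) : Decidable (Spec_expand_selected_tables_by_join_paths_py selected candidate_tables edges max_edges out) := by unfold Spec_expand_selected_tables_by_join_paths_py; infer_instance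

-- ===== CLAIM (what is proved, stated in full; the proofs are below) =====
def Claim_equal_expand_selected_tables_by_join_paths_py : Prop := ∀ (selected : List String) (candidate_tables : List String) (edges : List (List (String × String))) (max_edges : Int), Dom_expand_selected_tables_by_join_paths_py selected candidate_tables edges max_edges → Spec_expand_selected_tables_by_join_paths_py selected candidate_tables edges max_edges (expand_selected_tables_by_join_paths_py selected candidate_tables edges max_edges)

-- ===== LEMMAS AND PROOFS =====

-- ---- proof-only abbreviations ----

-- seen-set ↔ paths-table synchronisation
def pvSync (S : PySem.Set String) (P : PySem.Dict String (List String)) : Prop :=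
  ∀ x, S.contains x = (P.get? x).isSome

-- P' extends P (entries are never overwritten by the BFS)
def pvExt (P P' : PySem.Dict String (List String)) : Prop :=
  ∀ k v, P.get? k = some v → P'.get? k = some v

-- number of universe nodes not yet discovered (fuel accounting)
def pvFreeU (U : List String) (P : PySem.Dict String (List String)) : Nat :=
  (U.filter (fun x => (P.get? x) = none)).length

-- A's queue, reconstructed from B's path table
def pvQueueOf (P : PySem.Dict String (List String)) (ns : List String) : List (List String) :=
  ns.map (fun n => P.getD n [])

-- ---- adjacency builders agree ----
theorem pvAdjStep_eq (cset : PySem.Set String) (d : PySem.Dict String (List String))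
    (edge : List (String × String)) : pvAdjStepB cset d edge = pvAdjStepA cset d edge := by
  unfold pvAdjStepA pvAdjStepB
  rcases hf : (PySem.Dict.ofList edge).get? "from_table" with _ | ft <;>
    rcases ht : (PySem.Dict.ofList edge).get? "to_table" with _ | tt <;>
      simp only [hf, ht]
  by_cases h1 : ft ∈ cset <;> by_cases h2 : tt ∈ cset <;> simp [h1, h2]

theorem pvAdj_eq (cset : PySem.Set String) (edges : List (List (String × String))) :
    pvAdjB cset edges = pvAdjA cset edges := by
  unfold pvAdjA pvAdjB
  have h : pvAdjStepB cset = pvAdjStepA cset :=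
    funext fun d => funext fun e => pvAdjStep_eq cset d e
  rw [h]

-- adjacency values are keys
theorem pvAdjB_values_keys (cset : PySem.Set String) (edges : List (List (String × String))) :
    ∀ u v, v ∈ (pvAdjB cset edges).getD u [] → v ∈ (pvAdjB cset edges).keys := by
  unfold pvAdjB
  have H : ∀ (es : List (List (String × String))) (d : PySem.Dict String (List String)),
      (∀ u v, v ∈ d.getD u [] → v ∈ d.keys) →
      (∀ u v, v ∈ (es.foldl (pvAdjStepB cset) d).getD u [] → v ∈ (es.foldl (pvAdjStepB cset) d).keys) := by
    intro es
    induction es with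
    | nil => intro d h; exact h
    | cons e rest ih =>
        intro d h
        refine ih _ ?_
        intro u v hv
        unfold pvAdjStepB at hv ⊢
        rcases hf : (PySem.Dict.ofList e).get? "from_table" with _ | ft <;>
          rcases ht : (PySem.Dict.ofList e).get? "to_table" with _ | tt <;>
            simp only [hf, ht] at hv ⊢
        · exact h u v hv
        · exact h u v hv
        · exact h u v hv
        · by_cases hc : cset.contains ft && cset.contains tt
          · simp only [hc, if_true] at hv ⊢
            simp only [PySem.Dict.getD_insert, PySem.Dict.mem_keys_insert] at hv ⊢
            split_ifs at hv with h1 h2 h3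
            · simp only [List.mem_append, List.mem_singleton] at hv
              rcases hv with (hv | hv) | hv
              · exact Or.inr (Or.inr (h ft v hv))
              · exact Or.inl hv
              · exact Or.inr (Or.inl hv)
            · simp only [List.mem_append, List.mem_singleton] at hv
              rcases hv with hv | hv
              · exact Or.inr (Or.inr (h tt v hv))
              · exact Or.inr (Or.inl hv)
            · simp only [List.mem_append, List.mem_singleton] at hv
              rcases hv with hv | hv
              · exact Or.inr (Or.inr (h ft v hv))
              · exact Or.inl hv
            · exact Or.inr (Or.inr (h u v hv))
          · rw [Bool.not_eq_true] at hc
            simp only [hc, Bool.false_eq_true, if_false] at hv ⊢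
            exact h u v hv
  refine H edges PySem.Dict.empty ?_
  intro u v hv
  simp [PySem.Dict.getD_empty] at hv

-- adjacency has at most 2*|edges| keys
theorem pvAdjB_keys_len (cset : PySem.Set String) (edges : List (List (String × String))) :
    (pvAdjB cset edges).keys.length ≤ 2 * edges.length := by
  unfold pvAdjB
  have H : ∀ (es : List (List (String × String))) (d : PySem.Dict String (List String)),
      (es.foldl (pvAdjStepB cset) d).keys.length ≤ d.keys.length + 2 * es.length := by
    intro es
    induction es with
    | nil => intro d; simp
    | cons e rest ih =>
        intro d
        refine le_trans (ih _) ?_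
        have hstep : (pvAdjStepB cset d e).keys.length ≤ d.keys.length + 2 := by
          unfold pvAdjStepB
          rcases hf : (PySem.Dict.ofList e).get? "from_table" with _ | ft <;>
            rcases ht : (PySem.Dict.ofList e).get? "to_table" with _ | tt <;>
              simp only [hf, ht]
          · omega
          · omega
          · omega
          · by_cases hc : cset.contains ft && cset.contains tt
            · simp only [hc, if_true]
              have h1 : ∀ (d' : PySem.Dict String (List String)) (k : String) (v : List String),
                  (d'.insert k v).keys.length ≤ d'.keys.length + 1 := by
                intro d' k v
                by_cases hk : d'.contains k
                · rw [PySem.Dict.keys_insert_of_contains _ _ hk]; omega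
                · rw [PySem.Dict.keys_insert_of_not_contains _ _ (by simpa using hk)]
                  simp
              calc ((d.insert ft (d.getD ft [] ++ [tt])).insert tt _).keys.length
                  ≤ (d.insert ft (d.getD ft [] ++ [tt])).keys.length + 1 := h1 _ _ _
                _ ≤ d.keys.length + 1 + 1 := by have := h1 d ft (d.getD ft [] ++ [tt]); omega
                _ ≤ d.keys.length + 2 := by omega
            · rw [Bool.not_eq_true] at hc
              simp only [hc, Bool.false_eq_true, if_false]; omega
        simp only [List.length_cons]
        omega
  have := H edges PySem.Dict.empty
  simp only [PySem.Dict.keys_empty] at this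
  simpa using this

-- ---- generic small lemmas ----
theorem pvLoopA_nil (adj : PySem.Dict String (List String)) (endv : String) (me : Int)
    (fuel : Nat) (S : PySem.Set String) : pvLoopA adj endv me fuel [] S = [] := by
  cases fuel <;> rfl

theorem pvBfsB_nil (adj : PySem.Dict String (List String)) (me : Int) (fuel : Nat)
    (P : PySem.Dict String (List String)) (d : Int) : pvBfsB adj me fuel P [] d = P := by
  cases fuel <;> rfl

theorem pvExt_trans {P1 P2 P3 : PySem.Dict String (List String)}
    (h1 : pvExt P1 P2) (h2 : pvExt P2 P3) : pvExt P1 P3 :=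
  fun k v hk => h2 k v (h1 k v hk)

theorem pvExt_visit (u : String) (st : PySem.Dict String (List String) × List String)
    (v : String) : pvExt st.1 (pvVisit u st v).1 := by
  unfold pvVisit
  by_cases h : (st.1.get? v).isSome
  · simp only [h, if_true]; exact fun k w hk => hk
  · simp only [h, Bool.false_eq_true, if_false]
    intro k w hk
    have hne : k ≠ v := by
      intro he; subst he; rw [hk] at h; simp at h
    rw [PySem.Dict.get?_insert_of_ne _ _ hne]
    exact hk

theorem pvExt_foldVisit (u : String) (ns : List String)
    (st : PySem.Dict String (List String) × List String) :
    pvExt st.1 ((ns.foldl (pvVisit u) st).1) := by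
  induction ns generalizing st with
  | nil => exact fun k v hk => hk
  | cons n rest ih =>
      simp only [List.foldl_cons]
      exact pvExt_trans (pvExt_visit u st n) (ih _)

theorem pvExt_foldLevel (adj : PySem.Dict String (List String)) (F : List String)
    (st : PySem.Dict String (List String) × List String) :
    pvExt st.1 ((F.foldl (pvLevelStep adj) st).1) := by
  induction F generalizing st with
  | nil => exact fun k v hk => hk
  | cons n rest ih =>
      simp only [List.foldl_cons]
      exact pvExt_trans (pvExt_foldVisit n _ st) (ih _)

theorem pvExt_pvBfsB (adj : PySem.Dict String (List String)) (me : Int) (fuel : Nat)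
    (P : PySem.Dict String (List String)) (F : List String) (d : Int) :
    pvExt P (pvBfsB adj me fuel P F d) := by
  induction fuel generalizing P F d with
  | zero => exact fun k v hk => hk
  | succ fuel ih =>
      simp only [pvBfsB]
      split_ifs with h1 h2
      · exact fun k v hk => hk
      · exact pvExt_trans (pvExt_foldLevel adj F (P, [])) (ih _ _ _)
      · exact fun k v hk => hk

theorem pvFreeU_insert (U : List String) (P : PySem.Dict String (List String))
    (v : String) (w : List String) (hv : v ∈ U) (hnone : P.get? v = none) :
    pvFreeU U (P.insert v w) + 1 ≤ pvFreeU U P := by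
  unfold pvFreeU
  have both : ∀ (L : List String),
      (L.filter (fun x => (P.insert v w).get? x = none)).length ≤
        (L.filter (fun x => P.get? x = none)).length ∧
      (v ∈ L → (L.filter (fun x => (P.insert v w).get? x = none)).length + 1 ≤
        (L.filter (fun x => P.get? x = none)).length) := by
    intro L
    induction L with
    | nil => exact ⟨le_refl _, by simp⟩
    | cons x xs ih =>
        by_cases hx : x = v
        · subst hx
          simp only [List.filter_cons, PySem.Dict.get?_insert_self, hnone]
          simp only [reduceCtorEq, decide_false, Bool.false_eq_true, if_false, decide_true, if_true,
            List.length_cons]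
          exact ⟨by omega, fun _ => by omega⟩
        · simp only [List.filter_cons, PySem.Dict.get?_insert_of_ne _ _ hx]
          have hmem : v ∈ x :: xs → v ∈ xs := by
            intro h; rcases List.mem_cons.mp h with h | h
            · exact absurd h.symm hx
            · exact h
          by_cases hp : P.get? x = none
          · simp only [hp, decide_true, if_true, List.length_cons]
            exact ⟨by omega, fun h => by have := ih.2 (hmem h); omega⟩
          · simp only [hp, decide_false, Bool.false_eq_true, if_false]
            exact ⟨ih.1, fun h => ih.2 (hmem h)⟩
  exact (both U).2 hv

-- A drains a queue all of whose paths are at the depth cap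
theorem pvDrain (adj : PySem.Dict String (List String)) (endv : String) (me : Int) :
    ∀ (fuel : Nat) (qs : List (List String)) (S : PySem.Set String),
      (∀ p ∈ qs, ((p.length : Int) - 1 ≥ me)) → qs.length ≤ fuel →
      pvLoopA adj endv me fuel qs S = [] := by
  intro fuel
  induction fuel with
  | zero => intro qs S _ _; rfl
  | succ fuel ih =>
      intro qs S hall hlen
      match qs with
      | [] => rfl
      | p :: rest =>
          simp only [pvLoopA]
          rw [if_pos (hall p List.mem_cons_self)]
          exact ih rest S (fun q hq => hall q (List.mem_cons_of_mem _ hq)) (by simpa using Nat.le_of_succ_le_succ hlen)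

-- ---- the inner neighbour scan: A's early-return loop ≡ one 'pvVisit' fold ----
theorem pvInner_eq_fold (endv : String)
    (U : List String) (u : String) (p : List String) :
    ∀ (ns : List String) (P : PySem.Dict String (List String)) (acc : List String)
      (S : PySem.Set String) (qrest : List (List String)),
      pvSync S P → P.get? endv = none → P.get? u = some p → (∀ v ∈ ns, v ∈ U) →
      (match pvInnerA endv p ns S qrest with
       | .inl r => r = p ++ [endv] ∧ ((ns.foldl (pvVisit u) (P, acc)).1.get? endv = some (p ++ [endv]))
       | .inr sq =>
          pvSync sq.1 ((ns.foldl (pvVisit u) (P, acc)).1) ∧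
          ((ns.foldl (pvVisit u) (P, acc)).1.get? endv = none) ∧
          pvExt P ((ns.foldl (pvVisit u) (P, acc)).1) ∧
          (∃ fresh,
            (ns.foldl (pvVisit u) (P, acc)).2 = acc ++ fresh ∧
            sq.2 = qrest ++ pvQueueOf ((ns.foldl (pvVisit u) (P, acc)).1) fresh ∧
            (∀ n ∈ fresh, ∃ pn, (ns.foldl (pvVisit u) (P, acc)).1.get? n = some pn ∧
              pn.getLast? = some n ∧ pn.length = p.length + 1) ∧
            pvFreeU U ((ns.foldl (pvVisit u) (P, acc)).1) + fresh.length ≤ pvFreeU U P)) := by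
  intro ns
  induction ns with
  | nil =>
      intro P acc S qrest hsync hend hu hns
      simp only [pvInnerA, List.foldl_nil]
      refine ⟨hsync, hend, fun k v hk => hk, [], by simp, by simp [pvQueueOf], by simp, by simp⟩
  | cons v rest ih =>
      intro P acc S qrest hsync hend hu hns
      simp only [pvInnerA, List.foldl_cons]
      by_cases h1 : S.contains v = true
      · -- already seen: both sides skip
        have hsome : (P.get? v).isSome = true := (hsync v) ▸ h1
        have hvis : pvVisit u (P, acc) v = (P, acc) := by simp [pvVisit, hsome]
        rw [if_pos h1, hvis]
        exact ih P acc S qrest hsync hend hu (fun x hx => hns x (List.mem_cons_of_mem _ hx))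
      · have hnonev : P.get? v = none := by
          cases hval : P.get? v with
          | none => rfl
          | some w => exact absurd (by rw [hsync v, hval]; rfl) h1
        have hvis : pvVisit u (P, acc) v = (P.insert v (p ++ [v]), acc ++ [v]) := by
          have : P.getD u [] = p := by
            rw [PySem.Dict.getD_eq_get?_getD, hu]; rfl
          simp [pvVisit, hnonev, this]
        rw [if_neg h1, hvis]
        by_cases h2 : (v == endv) = true
        · -- found the end table
          have hv : v = endv := eq_of_beq h2
          subst hv
          rw [if_pos (beq_self_eq_true v)]
          refine ⟨rfl, ?_⟩
          exact pvExt_foldVisit u rest _ v (p ++ [v]) (PySem.Dict.get?_insert_self _ _ _)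
        · rw [if_neg h2]
          have hvne : v ≠ endv := by intro h; exact h2 (by simp [h])
          have hune : u ≠ v := by
            intro h; rw [h, hnonev] at hu; simp at hu
          have hsync' : pvSync (S.add v) (P.insert v (p ++ [v])) := by
            intro x
            apply Bool.coe_iff_coe.mp
            by_cases hx : x = v
            · subst hx
              constructor
              · intro _; rw [PySem.Dict.get?_insert_self]; rfl
              · intro _
                rw [PySem.Set.contains_iff]
                exact (PySem.Set.mem_add _ _ _).mpr (Or.inr rfl)
            · rw [PySem.Dict.get?_insert_of_ne _ _ hx]
              constructor
              · intro hc
                have := (PySem.Set.mem_add S v x).mp ((PySem.Set.contains_iff _ _).mp hc)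
                rcases this with hm | hm
                · rw [← hsync x]; exact (PySem.Set.contains_iff _ _).mpr hm
                · exact absurd hm hx
              · intro hc
                rw [PySem.Set.contains_iff]
                exact (PySem.Set.mem_add _ _ _).mpr (Or.inl ((PySem.Set.contains_iff _ _).mp ((hsync x) ▸ hc)))
          have hend' : (P.insert v (p ++ [v])).get? endv = none := by
            rw [PySem.Dict.get?_insert_of_ne _ _ (fun h => hvne h.symm)]; exact hend
          have hu' : (P.insert v (p ++ [v])).get? u = some p := by
            rw [PySem.Dict.get?_insert_of_ne _ _ hune]; exact hu
          have H := ih (P.insert v (p ++ [v])) (acc ++ [v]) (S.add v) (qrest ++ [p ++ [v]])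
            hsync' hend' hu' (fun x hx => hns x (List.mem_cons_of_mem _ hx))
          revert H
          cases hcase : pvInnerA endv p rest (S.add v) (qrest ++ [p ++ [v]]) with
          | inl r =>
              intro H
              exact H
          | inr sq =>
              intro H
              obtain ⟨Hsync, Hend, Hext, fresh', hf1, hf2, hf3, hf4⟩ := H
              refine ⟨Hsync, Hend,
                pvExt_trans (fun k w hk => by
                  have hkne : k ≠ v := by
                    intro he; rw [he, hnonev] at hk; simp at hk
                  rw [PySem.Dict.get?_insert_of_ne _ _ hkne]; exact hk) Hext,
                v :: fresh', ?_, ?_, ?_, ?_⟩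
              · rw [hf1]; simp
              · rw [hf2]
                have hgv : (rest.foldl (pvVisit u) (P.insert v (p ++ [v]), acc ++ [v])).1.getD v [] = p ++ [v] := by
                  rw [PySem.Dict.getD_eq_get?_getD,
                    Hext v (p ++ [v]) (PySem.Dict.get?_insert_self _ _ _)]
                  rfl
                simp [pvQueueOf, hgv]
              · intro n hn
                rcases List.mem_cons.mp hn with hn | hn
                · subst hn
                  exact ⟨p ++ [n], Hext n (p ++ [n]) (PySem.Dict.get?_insert_self _ _ _), by simp, by simp⟩
                · exact hf3 n hn
              · have hins := pvFreeU_insert U P v (p ++ [v]) (hns v List.mem_cons_self) hnonev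
                simp only [List.length_cons]
                omega

-- ---- one whole level: |F| iterations of A's while-loop ≡ one frontier fold of B ----
theorem pvScan (adj : PySem.Dict String (List String)) (endv : String) (U : List String)
    (me : Int) (dLen : Nat) (hd : ((dLen : Int) - 1) < me)
    (hU : ∀ u v, v ∈ adj.getD u [] → v ∈ U) :
    ∀ (F : List String) (P : PySem.Dict String (List String)) (acc : List String)
      (S : PySem.Set String) (fuelA : Nat),
      pvSync S P → P.get? endv = none →
      (∀ n ∈ F, ∃ pn, P.get? n = some pn ∧ pn.getLast? = some n ∧ pn.length = dLen) →
      (∀ n ∈ acc, ∃ pn, P.get? n = some pn ∧ pn.getLast? = some n ∧ pn.length = dLen + 1) →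
      F.length + acc.length + pvFreeU U P ≤ fuelA →
      (let st := F.foldl (pvLevelStep adj) (P, acc)
       (∃ r, st.1.get? endv = some r ∧
          pvLoopA adj endv me fuelA (pvQueueOf P F ++ pvQueueOf P acc) S = r) ∨
       (st.1.get? endv = none ∧
        ∃ S', pvSync S' st.1 ∧
          pvLoopA adj endv me fuelA (pvQueueOf P F ++ pvQueueOf P acc) S =
            pvLoopA adj endv me (fuelA - F.length) (pvQueueOf st.1 st.2) S' ∧
          (∀ n ∈ st.2, ∃ pn, st.1.get? n = some pn ∧ pn.getLast? = some n ∧ pn.length = dLen + 1) ∧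
          st.2.length + pvFreeU U st.1 ≤ acc.length + pvFreeU U P)) := by
  intro F
  induction F with
  | nil =>
      intro P acc S fuelA hsync hend hF hacc hfuel
      simp only [List.foldl_nil]
      refine Or.inr ⟨hend, S, hsync, ?_, hacc, le_refl _⟩
      simp [pvQueueOf]
  | cons u F' ih =>
      intro P acc S fuelA hsync hend hF hacc hfuel
      obtain ⟨pu, hpu, hlast, hlen⟩ := hF u List.mem_cons_self
      have hgu : P.getD u [] = pu := by rw [PySem.Dict.getD_eq_get?_getD, hpu]; rfl
      have hq : pvQueueOf P (u :: F') ++ pvQueueOf P acc =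
          pu :: (pvQueueOf P F' ++ pvQueueOf P acc) := by
        simp [pvQueueOf, hgu]
      rw [hq]
      cases fuelA with
      | zero => simp at hfuel
      | succ f =>
          simp only [pvLoopA]
          rw [if_neg (by rw [hlen]; omega)]
          have hlast' : (PySem.List.pyGet? pu (-1)).getD "" = u := by
            rw [PySem.List.pyGet?_neg_one, hlast]; rfl
          rw [hlast']
          have H := pvInner_eq_fold endv U u pu (adj.getD u []) P acc S
            (pvQueueOf P F' ++ pvQueueOf P acc) hsync hend hpu (fun x hx => hU u x hx)
          revert H
          cases hcase : pvInnerA endv pu (adj.getD u []) S (pvQueueOf P F' ++ pvQueueOf P acc) with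
          | inl r =>
              intro H
              obtain ⟨hr, hget⟩ := H
              left
              refine ⟨r, ?_, rfl⟩
              have hLS : (u :: F').foldl (pvLevelStep adj) (P, acc) =
                  F'.foldl (pvLevelStep adj) ((adj.getD u []).foldl (pvVisit u) (P, acc)) := rfl
              rw [hLS, hr]
              exact pvExt_foldLevel adj F' _ endv (pu ++ [endv]) (hr ▸ hget)
          | inr sq =>
              intro H
              obtain ⟨S2, q2⟩ := sq
              dsimp only
              obtain ⟨Hsync, Hnone, Hext, fresh, hst2, hq2, hprops, hfree⟩ := H
              dsimp only at Hsync hq2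
              set st1 := (adj.getD u []).foldl (pvVisit u) (P, acc) with hst1
              have hQF : pvQueueOf P F' = pvQueueOf st1.1 F' := by
                apply List.map_congr_left
                intro n hn
                obtain ⟨pn, hpn, _, _⟩ := hF n (List.mem_cons_of_mem _ hn)
                rw [PySem.Dict.getD_eq_get?_getD, hpn, PySem.Dict.getD_eq_get?_getD,
                  Hext n pn hpn]
              have hQacc : pvQueueOf P acc = pvQueueOf st1.1 acc := by
                apply List.map_congr_left
                intro n hn
                obtain ⟨pn, hpn, _, _⟩ := hacc n hn
                rw [PySem.Dict.getD_eq_get?_getD, hpn, PySem.Dict.getD_eq_get?_getD,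
                  Hext n pn hpn]
              have hq2' : q2 = pvQueueOf st1.1 F' ++ pvQueueOf st1.1 (acc ++ fresh) := by
                rw [hq2, hQF, hQacc]
                simp [pvQueueOf]
              have hIH := ih st1.1 (acc ++ fresh) S2 f Hsync Hnone
                (fun n hn => by
                  obtain ⟨pn, hpn, hl1, hl2⟩ := hF n (List.mem_cons_of_mem _ hn)
                  exact ⟨pn, Hext n pn hpn, hl1, hl2⟩)
                (fun n hn => by
                  rcases List.mem_append.mp hn with hn | hn
                  · obtain ⟨pn, hpn, hl1, hl2⟩ := hacc n hn
                    exact ⟨pn, Hext n pn hpn, hl1, hl2⟩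
                  · obtain ⟨pn, hpn, hl1, hl2⟩ := hprops n hn
                    exact ⟨pn, hpn, hl1, by rw [hl2, hlen]⟩)
                (by
                  have h1 : (u :: F').length + acc.length + pvFreeU U P ≤ f + 1 := hfuel
                  simp only [List.length_cons] at h1
                  simp only [List.length_append]
                  omega)
              have hLS : (u :: F').foldl (pvLevelStep adj) (P, acc) =
                  F'.foldl (pvLevelStep adj) st1 := rfl
              have hst12 : st1 = (st1.1, acc ++ fresh) := by
                rw [← hst2]
              rw [hLS, hst12] at *
              rcases hIH with ⟨r, hr1, hr2⟩ | ⟨h0, S', hs1, hs2, hs3, hs4⟩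
              · left
                refine ⟨r, hr1, ?_⟩
                rw [hq2']
                exact hr2
              · right
                refine ⟨h0, S', hs1, ?_, hs3, ?_⟩
                · rw [hq2']
                  have hfu : (f + 1) - (u :: F').length = f - F'.length := by
                    simp only [List.length_cons]; omega
                  rw [hfu]
                  exact hs2
                · simp only [List.length_append] at hs4
                  omega

-- ---- whole BFS: A's while-loop ≡ B's level loop, read off at 'endv' ----
theorem pvLevel (adj : PySem.Dict String (List String)) (endv : String) (U : List String)
    (me : Int) (hU : ∀ u v, v ∈ adj.getD u [] → v ∈ U) :
    ∀ (fuelB : Nat) (P : PySem.Dict String (List String)) (F : List String)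
      (S : PySem.Set String) (d : Int) (dLen : Nat) (fuelA : Nat),
      pvSync S P → P.get? endv = none →
      (∀ n ∈ F, ∃ pn, P.get? n = some pn ∧ pn.getLast? = some n ∧ pn.length = dLen) →
      (dLen : Int) = d + 1 →
      F.length + pvFreeU U P ≤ fuelA →
      pvFreeU U P + 1 ≤ fuelB →
      pvLoopA adj endv me fuelA (pvQueueOf P F) S = (pvBfsB adj me fuelB P F d).getD endv [] := by
  intro fuelB
  induction fuelB with
  | zero =>
      intro P F S d dLen fuelA _ _ _ _ _ hfB
      omega
  | succ fuelB ih =>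
      intro P F S d dLen fuelA hsync hend hF hd hfA hfB
      simp only [pvBfsB]
      by_cases hFe : F.isEmpty
      · rw [if_pos hFe]
        rw [List.isEmpty_iff] at hFe
        subst hFe
        rw [show pvQueueOf P [] = [] from rfl, pvLoopA_nil,
          PySem.Dict.getD_eq_get?_getD, hend]
        rfl
      · rw [if_neg hFe]
        by_cases hdm : d < me
        · rw [if_pos hdm]
          have hscan := pvScan adj endv U me dLen (by omega) hU F P [] S fuelA hsync hend hF
            (by intro n hn; simp at hn) (by simpa using hfA)
          rw [show pvQueueOf P F ++ pvQueueOf P [] = pvQueueOf P F by simp [pvQueueOf]] at hscan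
          set st := F.foldl (pvLevelStep adj) (P, []) with hst
          rcases hscan with ⟨r, hr, heq⟩ | ⟨h0, S', hs1, hs2, hs3, hs4⟩
          · rw [heq, PySem.Dict.getD_eq_get?_getD,
              pvExt_pvBfsB adj me fuelB st.1 st.2 (d + 1) endv r hr]
            rfl
          · rw [hs2]
            match hst2 : st.2 with
            | [] =>
                rw [show pvQueueOf st.1 [] = [] from rfl, pvLoopA_nil, pvBfsB_nil,
                  PySem.Dict.getD_eq_get?_getD, h0]
                rfl
            | n0 :: rest =>
                rw [← hst2]
                refine ih st.1 st.2 S' (d + 1) (dLen + 1) (fuelA - F.length) hs1 h0 hs3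
                  (by push_cast; omega) ?_ ?_
                · have hFlen : F.length ≤ fuelA := by omega
                  simp only [List.length_nil, Nat.zero_add] at hs4
                  omega
                · have hlen2 : 1 ≤ st.2.length := by rw [hst2]; simp
                  simp only [List.length_nil, Nat.zero_add] at hs4
                  omega
        · rw [if_neg hdm]
          rw [PySem.Dict.getD_eq_get?_getD, hend]
          show _ = ([] : List String)
          refine pvDrain adj endv me fuelA (pvQueueOf P F) S ?_ ?_
          · intro p hp
            rcases List.mem_map.mp hp with ⟨n, hn, hpn⟩
            obtain ⟨pn, hget, _, hlen⟩ := hF n hn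
            have : p = pn := by
              rw [← hpn, PySem.Dict.getD_eq_get?_getD, hget]
              rfl
            rw [this, hlen]
            omega
          · simp only [pvQueueOf, List.length_map]
            omega

-- ---- per-pair: A's _shortest_join_path = a lookup in B's per-left path table ----
theorem pvPair_eq (edges : List (List (String × String))) (cset : PySem.Set String)
    (me : Int) (left right : String)
    (hl : cset.contains left = true) (hr : cset.contains right = true) (hne : ¬ right = left) :
    pvShortestJoinPathA left right edges cset me =
      (pvBfsB (pvAdjB cset edges) me (2 * edges.length + 2)
        (PySem.Dict.empty.insert left [left]) [left] 0).getD right [] := by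
  unfold pvShortestJoinPathA
  have hbe : (left == right) = false := beq_eq_false_iff_ne.mpr (fun h => hne h.symm)
  rw [if_neg (by simp [hbe, (PySem.Set.contains_iff _ _).mp hl, (PySem.Set.contains_iff _ _).mp hr])]
  rw [← pvAdj_eq]
  set adj := pvAdjB cset edges with hadj
  set P : PySem.Dict String (List String) := PySem.Dict.empty.insert left [left] with hP
  have hfree : pvFreeU adj.keys P ≤ 2 * edges.length := by
    refine le_trans ?_ (pvAdjB_keys_len cset edges)
    unfold pvFreeU
    exact List.length_filter_le _ _
  have hq0 : pvQueueOf P [left] = [[left]] := by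
    simp [pvQueueOf, hP, PySem.Dict.getD_eq_get?_getD, PySem.Dict.get?_insert_self]
  show pvLoopA adj right me (2 * edges.length + 2) [[left]] (PySem.Set.ofList [left]) =
    (pvBfsB adj me (2 * edges.length + 2) P [left] 0).getD right []
  rw [← hq0]
  refine pvLevel adj right adj.keys me (pvAdjB_values_keys cset edges)
    (2 * edges.length + 2) P [left] (PySem.Set.ofList [left]) 0 1 (2 * edges.length + 2)
    ?_ ?_ ?_ (by norm_num) (by simp only [List.length_singleton]; omega) (by omega)
  · intro x
    apply Bool.coe_iff_coe.mp
    rw [PySem.Set.contains_iff, PySem.Set.mem_ofList]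
    by_cases hx : x = left
    · subst hx
      simp [hP, PySem.Dict.get?_insert_self]
    · rw [hP, PySem.Dict.get?_insert_of_ne _ _ hx, PySem.Dict.get?_empty]
      simp [hx]
  · rw [hP, PySem.Dict.get?_insert_of_ne _ _ hne, PySem.Dict.get?_empty]
  · intro n hn
    have : n = left := by simpa using hn
    subst this
    exact ⟨[n], PySem.Dict.get?_insert_self _ _ _, by simp, by simp⟩

-- ---- list-with-membership-set fold vs plain-list fold ----
theorem pvFoldRel {alpha : Type} (L : List alpha)
    (fA : List String → alpha → List String)
    (fB : List String × PySem.Set String → alpha → List String × PySem.Set String)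
    (h : ∀ st a, a ∈ L → (∀ x, x ∈ st.2 ↔ x ∈ st.1) →
      (fB st a).1 = fA st.1 a ∧ (∀ x, x ∈ (fB st a).2 ↔ x ∈ (fB st a).1)) :
    ∀ st, (∀ x, x ∈ st.2 ↔ x ∈ st.1) →
      (L.foldl fB st).1 = L.foldl fA st.1 ∧
        (∀ x, x ∈ (L.foldl fB st).2 ↔ x ∈ (L.foldl fB st).1) := by
  induction L with
  | nil => intro st hst; exact ⟨rfl, hst⟩
  | cons a rest ih =>
      intro st hst
      have ha := h st a (List.mem_cons_self) hst
      have := ih (fun st a hmem => h st a (List.mem_cons_of_mem _ hmem)) (fB st a) ha.2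
      simp only [List.foldl_cons]
      rw [← ha.1]
      exact this

theorem pvStepRel (st : List String × PySem.Set String) (t : String)
    (hst : ∀ x, x ∈ st.2 ↔ x ∈ st.1) :
    ((if st.2.contains t then st else (st.1 ++ [t], st.2.add t)).1 =
      (if st.1.contains t then st.1 else st.1 ++ [t])) ∧
    (∀ x, x ∈ (if st.2.contains t then st else (st.1 ++ [t], st.2.add t)).2 ↔
      x ∈ (if st.2.contains t then st else (st.1 ++ [t], st.2.add t)).1) := by
  by_cases hm : t ∈ st.1
  · simp [hm, hst]
  · simp [hm, hst]

theorem pvMain_eq (selected candidate_tables : List String)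
    (edges : List (List (String × String))) (max_edges : Int) :
    expand_selected_tables_by_join_paths_py selected candidate_tables edges max_edges =
      expand_selected_tables_by_join_paths_py_alt selected candidate_tables edges max_edges := by
  unfold expand_selected_tables_by_join_paths_py expand_selected_tables_by_join_paths_py_alt
  set cset := PySem.Set.ofList candidate_tables with hcset
  set anchors := selected.filter (fun t => cset.contains t) with hanchors
  refine ((pvFoldRel (PySem.List.enumerate anchors) _ _ ?_ (selected, PySem.Set.ofList selected)
    (fun x => by simp [PySem.Set.mem_ofList])).1).symm
  intro st p hp hst
  have hleft : p.2 ∈ anchors := by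
    obtain ⟨k, hk, hpk⟩ := (PySem.List.mem_enumerate_iff _ _ _).mp hp
    rw [hpk]
    exact List.getElem_mem hk
  have hleftc : cset.contains p.2 := (List.mem_filter.mp (hanchors ▸ hleft)).2
  by_cases hre : (PySem.List.slice anchors (some (p.1 + 1)) none).isEmpty
  · rw [if_pos hre]
    rw [List.isEmpty_iff] at hre
    rw [hre]
    exact ⟨by simp, hst⟩
  · rw [if_neg hre]
    refine pvFoldRel (PySem.List.slice anchors (some (p.1 + 1)) none) _ _ ?_ st hst
    intro st' right hr hst'
    by_cases hbr : (right == p.2) = true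
    · rw [if_pos hbr]
      have hrp : right = p.2 := eq_of_beq hbr
      have hempty : pvShortestJoinPathA p.2 right edges cset max_edges = [] := by
        unfold pvShortestJoinPathA
        rw [if_pos (by simp [hrp])]
      rw [hempty]
      exact ⟨by simp [PySem.List.slice], hst'⟩
    · rw [if_neg hbr]
      have hrightc : cset.contains right :=
        (List.mem_filter.mp (hanchors ▸ PySem.List.mem_of_mem_slice _ _ _ hr)).2
      have hne : ¬ right = p.2 := fun h => hbr (by simp [h])
      rw [← pvPair_eq edges cset max_edges p.2 right hleftc hrightc hne]
      exact pvFoldRel (PySem.List.slice (pvShortestJoinPathA p.2 right edges cset max_edges)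
        (some 1) (some (-1))) _ _ (fun st t _ hst => pvStepRel st t hst) st' hst'

-- ===== VERDICT (by name: the statement is the Claim_ definition above) =====
theorem expand_selected_tables_by_join_paths_py_spec : Claim_equal_expand_selected_tables_by_join_paths_py := by
  intro selected candidate_tables edges max_edges _
  exact pvMain_eq selected candidate_tables edges max_edges
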